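-- pv_equiv track=rewrite | github.com/benquick123/code-profiling | code/batch-2/vse-naloge-brez-testov/DN7-M-058.py | sosedov
-- ===== SOURCE A (Python) =====
-- def sosedov(x, y, mine):
--     sosedi = 0
--     for x0, y0 in mine:
--         if x0 == x:
--             if y0 == y - 1:
--                sosedi += 1
--             elif y0 == y + 1:
--                 sosedi += 1
--         elif y0 == y:
--             if x0 == x - 1:
--                 sosedi += 1
--             elif x0 == x + 1:
--                 sosedi += 1
--         elif y0 == y - 1:
--             if x0 == x - 1:
--                 sosedi += 1
--             elif x0 == x + 1:
--                 sosedi += 1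
--         elif y0 == y + 1:
--             if x0 == x - 1:
--                 sosedi += 1
--             elif x0 == x + 1:
--                 sosedi += 1
--     return sosedi
-- ===== SOURCE B (Python) =====
-- def sosedov(x, y, mine):
--     neighbors = [(x - 1, y - 1), (x - 1, y), (x - 1, y + 1),
--                  (x, y - 1), (x, y + 1),
--                  (x + 1, y - 1), (x + 1, y), (x + 1, y + 1)]
--     return sum(mine.count(nb) for nb in neighbors)
-- ===== Notes on version B (the rewrite author's own statement) =====
-- stated objective: simpler
-- what changed: Instead of scanning each cell of mine through a nested if/elif classification, B builds the fixed list of the 8 neighbor coordinates of (x,y) and returns the sum of mine.count(nb) over them.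
import Mathlib
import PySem

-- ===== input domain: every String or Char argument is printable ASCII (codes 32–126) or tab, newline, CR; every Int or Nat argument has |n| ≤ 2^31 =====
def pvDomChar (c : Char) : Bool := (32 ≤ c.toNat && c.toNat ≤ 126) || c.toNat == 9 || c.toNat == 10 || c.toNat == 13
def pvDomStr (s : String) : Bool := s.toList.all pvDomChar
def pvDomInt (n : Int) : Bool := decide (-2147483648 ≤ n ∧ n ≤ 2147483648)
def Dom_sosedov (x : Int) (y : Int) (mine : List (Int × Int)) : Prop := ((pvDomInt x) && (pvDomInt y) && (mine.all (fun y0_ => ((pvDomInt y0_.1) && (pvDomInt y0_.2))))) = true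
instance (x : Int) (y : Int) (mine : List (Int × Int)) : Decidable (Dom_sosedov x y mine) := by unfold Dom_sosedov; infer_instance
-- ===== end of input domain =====

-- B replaces A's per-cell if/elif classification by summing mine.count over the 8 fixed neighbor coordinates (simpler decomposition, same cost).


-- ===== PORT A =====
-- the body of A's for-loop: the nested if/elif chain updating `sosedi`
def sosedovStep (x y : Int) (sosedi : Int) (p : Int × Int) : Int :=
  let x0 := p.1
  let y0 := p.2
  if x0 = x then
    if y0 = y - 1 then sosedi + 1
    else if y0 = y + 1 then sosedi + 1
    else sosedi
  else if y0 = y then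
    if x0 = x - 1 then sosedi + 1
    else if x0 = x + 1 then sosedi + 1
    else sosedi
  else if y0 = y - 1 then
    if x0 = x - 1 then sosedi + 1
    else if x0 = x + 1 then sosedi + 1
    else sosedi
  else if y0 = y + 1 then
    if x0 = x - 1 then sosedi + 1
    else if x0 = x + 1 then sosedi + 1
    else sosedi
  else sosedi

def sosedov (x : Int) (y : Int) (mine : List (Int × Int)) : Int :=
  mine.foldl (sosedovStep x y) 0

-- ===== PORT B =====
def sosedov_alt (x : Int) (y : Int) (mine : List (Int × Int)) : Int :=
  let neighbors : List (Int × Int) :=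
    [(x - 1, y - 1), (x - 1, y), (x - 1, y + 1),
     (x, y - 1), (x, y + 1),
     (x + 1, y - 1), (x + 1, y), (x + 1, y + 1)]
  neighbors.foldl (fun acc nb => acc + (PySem.List.count mine nb : Int)) 0

-- ===== PRECONDITION & SPEC =====
def Spec_sosedov (x : Int) (y : Int) (mine : List (Int × Int)) (out : Int) : Prop := out = sosedov_alt x y mine
instance (x : Int) (y : Int) (mine : List (Int × Int)) (out : Int) : Decidable (Spec_sosedov x y mine out) := by unfold Spec_sosedov; infer_instance

-- ===== CLAIM (what is proved, stated in full; the proofs are below) =====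
def Claim_equal_sosedov : Prop := ∀ (x : Int) (y : Int) (mine : List (Int × Int)), Dom_sosedov x y mine → Spec_sosedov x y mine (sosedov x y mine)

-- ===== LEMMAS AND PROOFS =====

-- the 0/1 contribution of one cell p, written as A's if-chain
def ind (x y : Int) (p : Int × Int) : Int :=
  if p.1 = x then
    if p.2 = y - 1 then 1 else if p.2 = y + 1 then 1 else 0
  else if p.2 = y then
    if p.1 = x - 1 then 1 else if p.1 = x + 1 then 1 else 0
  else if p.2 = y - 1 then
    if p.1 = x - 1 then 1 else if p.1 = x + 1 then 1 else 0
  else if p.2 = y + 1 then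
    if p.1 = x - 1 then 1 else if p.1 = x + 1 then 1 else 0
  else 0

theorem sosedovStep_eq (x y a : Int) (p : Int × Int) :
    sosedovStep x y a p = a + ind x y p := by
  simp only [sosedovStep, ind]
  split_ifs <;> omega

-- the sum of the 8 membership indicators of one cell equals A's if-chain contribution
theorem ind_eq_sum (x y a b : Int) :
    (if (a, b) = (x - 1, y - 1) then (1:Int) else 0)
    + (if (a, b) = (x - 1, y) then 1 else 0)
    + (if (a, b) = (x - 1, y + 1) then 1 else 0)
    + (if (a, b) = (x, y - 1) then 1 else 0)
    + (if (a, b) = (x, y + 1) then 1 else 0)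
    + (if (a, b) = (x + 1, y - 1) then 1 else 0)
    + (if (a, b) = (x + 1, y) then 1 else 0)
    + (if (a, b) = (x + 1, y + 1) then 1 else 0)
    = ind x y (a, b) := by
  simp only [ind, Prod.mk.injEq, ite_and]
  split_ifs <;> omega

theorem foldl_sosedovStep_shift (x y : Int) (l : List (Int × Int)) (a : Int) :
    l.foldl (sosedovStep x y) a = a + l.foldl (sosedovStep x y) 0 := by
  induction l generalizing a with
  | nil => simp
  | cons p l ih =>
    rw [List.foldl_cons, List.foldl_cons, ih, ih (sosedovStep x y 0 p),
      sosedovStep_eq, sosedovStep_eq]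
    ring

theorem sosedov_cons (x y : Int) (p : Int × Int) (l : List (Int × Int)) :
    sosedov x y (p :: l) = ind x y p + sosedov x y l := by
  simp only [sosedov, List.foldl_cons]
  rw [foldl_sosedovStep_shift, sosedovStep_eq]
  ring

theorem sosedov_alt_cons (x y : Int) (p : Int × Int) (l : List (Int × Int)) :
    sosedov_alt x y (p :: l) = ind x y p + sosedov_alt x y l := by
  obtain ⟨a, b⟩ := p
  simp only [sosedov_alt, List.foldl_cons, List.foldl_nil, PySem.List.count,
    List.count_cons, beq_iff_eq]
  push_cast
  rw [← ind_eq_sum x y a b]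
  ring

-- ===== VERDICT (by name: the statement is the Claim_ definition above) =====
theorem sosedov_eq_alt (x y : Int) (mine : List (Int × Int)) :
    sosedov x y mine = sosedov_alt x y mine := by
  induction mine with
  | nil => simp [sosedov, sosedov_alt, PySem.List.count]
  | cons p l ih => rw [sosedov_cons, sosedov_alt_cons, ih]

theorem sosedov_spec : Claim_equal_sosedov := by
  intro x y mine _
  exact sosedov_eq_alt x y mine
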